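-- pv_equiv track=rewrite | github.com/viper010404/Nutrissistant | schedule_agent.py | find_available_slot
-- ===== SOURCE A (Python) =====
-- def find_available_slot(schedule, day, duration_slots):
--     if day not in schedule: return None
--     day_schedule = schedule[day]
--     times = list(day_schedule.keys())
--     for i in range(len(times) - duration_slots + 1):
--         if all(day_schedule[times[i+j]] == "-" for j in range(duration_slots)):
--             return times[i]
--     return None
-- ===== SOURCE B (Python) =====
-- def find_available_slot(schedule, day, duration_slots):
--     if day not in schedule:
--         return None
--     day_schedule = schedule[day]
--     if duration_slots <= 0:
--         # an empty window of slots fits at the very start of the day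
--         return next(iter(day_schedule), None)
--     run_start = None
--     run_len = 0
--     for time, status in day_schedule.items():
--         if status == "-":
--             if run_len == 0:
--                 run_start = time
--             run_len += 1
--             if run_len == duration_slots:
--                 return run_start
--         else:
--             run_len = 0
--     return None
-- ===== Notes on version B (the rewrite author's own statement) =====
-- stated objective: alternative
-- what changed: B replaces A's nested scan (which re-checks a window of up to duration_slots slots at every start index) by a single pass over the day's slots that counts the current run of consecutive free slots and returns the run's start once it reaches the requested duration; Pre_ excludes inner schedules with duplicate keys (unrepresentable as Python dicts) and the empty-day/nonpositive-duration corner where A raises IndexError.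
import Mathlib
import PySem

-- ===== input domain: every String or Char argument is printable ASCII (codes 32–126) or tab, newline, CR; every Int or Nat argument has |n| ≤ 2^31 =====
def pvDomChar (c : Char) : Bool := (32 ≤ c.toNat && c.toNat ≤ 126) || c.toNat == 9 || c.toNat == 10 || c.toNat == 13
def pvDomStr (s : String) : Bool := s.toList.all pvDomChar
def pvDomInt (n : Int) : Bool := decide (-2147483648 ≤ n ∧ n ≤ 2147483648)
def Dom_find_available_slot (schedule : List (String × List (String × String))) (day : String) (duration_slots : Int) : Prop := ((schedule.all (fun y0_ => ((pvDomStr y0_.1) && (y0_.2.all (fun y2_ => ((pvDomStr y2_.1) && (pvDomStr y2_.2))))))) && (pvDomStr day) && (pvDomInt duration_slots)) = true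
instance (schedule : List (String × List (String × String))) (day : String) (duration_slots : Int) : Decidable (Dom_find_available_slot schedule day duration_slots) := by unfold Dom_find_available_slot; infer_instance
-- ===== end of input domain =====

-- B replaces A's per-start-index window re-scan by a single pass that counts the current run of
-- consecutive free slots and returns the run's start when it reaches the requested duration
-- (alternative algorithm; measured cost similar, since A's window check short-circuits).

-- ===== PORT A =====
-- 'for i in range(len(times) - duration_slots + 1): if all(...): return times[i]' with early return.
-- 'return times[i]' is pyGet?; it is none exactly where Python raises IndexError (excluded by Pre_).
def fasALoop (day_schedule : PySem.Dict String String) (times : List String)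
    (duration_slots bound i : Int) : Option String :=
  if h : i < bound then
    if (PySem.List.pyRange 0 duration_slots).all (fun j =>
        ((PySem.List.pyGet? times (i + j)).bind (fun t => day_schedule.get? t)) == some "-")
    then PySem.List.pyGet? times i
    else fasALoop day_schedule times duration_slots bound (i + 1)
  else none
termination_by (bound - i).toNat
decreasing_by omega

def find_available_slot (schedule : List (String × List (String × String))) (day : String) (duration_slots : Int) : Option String :=
  match (PySem.Dict.mk schedule).get? day with
  | none => none
  | some ds0 =>
      let day_schedule := PySem.Dict.mk ds0
      let times := day_schedule.keys
      fasALoop day_schedule times duration_slots ((times.length : Int) - duration_slots + 1) 0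

-- ===== PORT B =====
-- the single pass of Source B over day_schedule.items() with state (run_start, run_len)
def fasBLoop (duration_slots : Int) (items : List (String × String))
    (run_start : Option String) (run_len : Int) : Option String :=
  match items with
  | [] => none
  | (time, status) :: rest =>
    if status == "-" then
      let run_start' := if run_len == 0 then some time else run_start
      if run_len + 1 == duration_slots then run_start'
      else fasBLoop duration_slots rest run_start' (run_len + 1)
    else fasBLoop duration_slots rest run_start 0

def find_available_slot_alt (schedule : List (String × List (String × String))) (day : String) (duration_slots : Int) : Option String :=
  match (PySem.Dict.mk schedule).get? day with
  | none => none
  | some ds0 =>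
      let day_schedule := PySem.Dict.mk ds0
      if duration_slots ≤ 0 then day_schedule.keys.head?
      else fasBLoop duration_slots day_schedule.items none 0

-- ===== PRECONDITION & SPEC =====
-- Pre_ excludes (a) inner day-schedules with duplicate keys, which no Python dict can represent
-- (the assoc-list corner is anybody's), and (b) the day being present with an EMPTY schedule and
-- duration_slots ≤ 0, where A raises IndexError on times[0] (see Raises_ below).
def Pre_find_available_slot (schedule : List (String × List (String × String))) (day : String) (duration_slots : Int) : Prop :=
  ((schedule.find? (fun p => p.1 == day)).all (fun p =>
    decide ((p.2.map Prod.fst).Nodup) && (decide (p.2 ≠ []) || decide (1 ≤ duration_slots)))) = true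
instance (schedule : List (String × List (String × String))) (day : String) (duration_slots : Int) : Decidable (Pre_find_available_slot schedule day duration_slots) := by unfold Pre_find_available_slot; infer_instance

def pvWitness_find_available_slot : (List (String × List (String × String))) × String × Int :=
  ([("mon", [("09:00", "busy"), ("10:00", "-"), ("11:00", "-")])], "mon", 2)

def Spec_find_available_slot (schedule : List (String × List (String × String))) (day : String) (duration_slots : Int) (out : Option String) : Prop := out = find_available_slot_alt schedule day duration_slots
instance (schedule : List (String × List (String × String))) (day : String) (duration_slots : Int) (out : Option String) : Decidable (Spec_find_available_slot schedule day duration_slots out) := by unfold Spec_find_available_slot; infer_instance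

-- ===== CLAIM (what is proved, stated in full; the proofs are below) =====
def Claim_equal_find_available_slot : Prop := ∀ (schedule : List (String × List (String × String))) (day : String) (duration_slots : Int), Dom_find_available_slot schedule day duration_slots → Pre_find_available_slot schedule day duration_slots → Spec_find_available_slot schedule day duration_slots (find_available_slot schedule day duration_slots)


-- ===== LEMMAS AND PROOFS =====

-- reference structural form of A's scan: try each start position in order
def fasStruct (dur : Int) : List (String × String) → Option String
  | [] => none
  | x :: rest =>
      if decide (dur ≤ ((x :: rest).length : Int)) &&
         ((x :: rest).take dur.toNat).all (fun p => p.2 == "-")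
      then some x.1 else fasStruct dur rest

lemma fasStruct_none_of_short (dur : Int) (l : List (String × String))
    (h : (l.length : Int) < dur) : fasStruct dur l = none := by
  induction l with
  | nil => rfl
  | cons x rest ih =>
      rw [fasStruct]
      have : ¬ (dur ≤ ((x :: rest).length : Int)) := by omega
      simp only [decide_eq_false this, Bool.false_and, if_neg Bool.false_ne_true]
      exact ih (by simp at h ⊢; omega)

lemma take_all_mono {α : Type} (p : α → Bool) (l : List α) {m m' : Nat} (h : m ≤ m')
    (hall : (l.take m').all p = true) : (l.take m).all p = true := by
  have : l.take m = (l.take m').take m := by rw [List.take_take, Nat.min_eq_left h]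
  rw [this, List.all_eq_true] at *
  exact fun x hx => hall x (List.take_subset _ _ hx)

lemma fasStruct_cons_busy (dur : Int) (hdur : 1 ≤ dur) (t s : String)
    (rest : List (String × String)) (hs : (s == "-") = false) :
    fasStruct dur ((t, s) :: rest) = fasStruct dur rest := by
  rw [fasStruct]
  have h1 : dur.toNat = (dur.toNat - 1) + 1 := by omega
  rw [h1, List.take_succ_cons]
  simp [hs]

lemma take_cons_all_free (dur : Int) (hdur : 1 ≤ dur) (t s : String)
    (rest : List (String × String)) (hs : (s == "-") = true) :
    (((t, s) :: rest).take dur.toNat).all (fun p => p.2 == "-")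
      = (rest.take (dur - 1).toNat).all (fun p => p.2 == "-") := by
  have h1 : dur.toNat = (dur - 1).toNat + 1 := by omega
  rw [h1, List.take_succ_cons]
  simp [hs]

lemma fasBLoop_rs_zero (dur : Int) (l : List (String × String)) (rs rs' : Option String) :
    fasBLoop dur l rs 0 = fasBLoop dur l rs' 0 := by
  induction l generalizing rs rs' with
  | nil => rfl
  | cons x rest ih =>
      obtain ⟨t, s⟩ := x
      rw [fasBLoop, fasBLoop]
      cases hs : (s == "-")
      · simp only [Bool.false_eq_true, if_false]
        exact ih rs rs'
      · simp

lemma fasBLoop_main (dur : Int) (hdur : 1 ≤ dur) :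
    ∀ n (l : List (String × String)), l.length = n →
      (fasBLoop dur l none 0 = fasStruct dur l) ∧
      (∀ (s : String) (rl : Int), 1 ≤ rl → rl < dur →
        fasBLoop dur l (some s) rl =
          if decide (dur ≤ rl + (l.length : Int)) &&
             (l.take (dur - rl).toNat).all (fun p => p.2 == "-")
          then some s else fasStruct dur l) := by
  intro n
  induction n using Nat.strong_induction_on with
  | _ n ih =>
    intro l hlen
    match l with
    | [] =>
        refine ⟨rfl, ?_⟩
        intro s rl h1 h2
        simp [fasBLoop, fasStruct]
        omega
    | (t, s) :: rest =>
        have hrl : rest.length < n := by simp [← hlen]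
        have ihr := ih rest.length hrl rest rfl
        constructor
        · rw [fasBLoop]
          cases hs : (s == "-")
          · simp only [Bool.false_eq_true, if_false]
            rw [ihr.1, fasStruct_cons_busy dur hdur t s rest hs]
          · simp only [if_true]
            have h00 : ((0 : Int) == 0) = true := by decide
            simp only [h00, if_true]
            by_cases hd : (0 : Int) + 1 = dur
            · have : ((0:Int) + 1 == dur) = true := by simp [hd]
              rw [this, if_pos rfl]
              have hd1 : dur = 1 := by omega
              subst hd1
              rw [fasStruct]
              simp [hs]
            · have : ((0:Int) + 1 == dur) = false := by simp; omega
              rw [this]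
              simp only [Bool.false_eq_true, if_false]
              rw [zero_add, ihr.2 t 1 (le_refl 1) (by omega)]
              rw [fasStruct]
              rw [take_cons_all_free dur hdur t s rest hs]
              simp only [List.length_cons, Nat.cast_add, Nat.cast_one]
              rw [Int.add_comm 1 ((rest.length : Nat) : Int)]
        · intro s0 rl h1 h2
          rw [fasBLoop]
          cases hs : (s == "-")
          · simp only [Bool.false_eq_true, if_false]
            rw [fasBLoop_rs_zero dur rest (some s0) none, ihr.1,
                fasStruct_cons_busy dur hdur t s rest hs]
            have hc : ((((t, s) :: rest).take (dur - rl).toNat).all (fun p => p.2 == "-")) = false := by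
              have h1' : (dur - rl).toNat = ((dur - rl).toNat - 1) + 1 := by omega
              rw [h1', List.take_succ_cons]
              simp [hs]
            rw [hc]
            simp
          · simp only [if_true]
            have hrl0 : (rl == 0) = false := by simp; omega
            rw [hrl0]
            simp only [Bool.false_eq_true, if_false]
            by_cases hd : rl + 1 = dur
            · have : (rl + 1 == dur) = true := by simp [hd]
              rw [this, if_pos rfl]
              have hcond : (decide (dur ≤ rl + ((((t,s) :: rest).length : Nat) : Int)) &&
                  (((t,s) :: rest).take (dur - rl).toNat).all (fun p => p.2 == "-")) = true := by
                have hlen' : dur ≤ rl + (((t,s) :: rest).length : Int) := by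
                  simp only [List.length_cons]; push_cast; omega
                have htk : (dur - rl).toNat = 1 := by omega
                rw [htk]
                simp [hs]
                push_cast at hlen' ⊢
                omega
              rw [hcond]
              rfl
            · have : (rl + 1 == dur) = false := by simp [hd]
              rw [this]
              simp only [Bool.false_eq_true, if_false]
              rw [ihr.2 s0 (rl + 1) (by omega) (by omega)]
              have htake : ((((t,s) :: rest).take (dur - rl).toNat).all (fun p => p.2 == "-"))
                  = ((rest.take (dur - rl - 1).toNat).all (fun p => p.2 == "-")) := by
                have h1' : (dur - rl).toNat = (dur - rl - 1).toNat + 1 := by omega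
                rw [h1', List.take_succ_cons]
                simp [hs]
              have hsub : dur - (rl + 1) = dur - rl - 1 := by ring
              have hlen3 : (decide (dur ≤ rl + ((((t,s)::rest).length : Nat) : Int)))
                  = decide (dur ≤ rl + 1 + ((rest.length : Nat) : Int)) := by
                apply decide_eq_decide.mpr
                simp only [List.length_cons]
                push_cast
                omega
              rw [htake, hsub, hlen3]
              by_cases hC : (decide (dur ≤ rl + 1 + ((rest.length : Nat) : Int)) &&
                  (rest.take (dur - rl - 1).toNat).all (fun p => p.2 == "-")) = true
              · rw [if_pos hC, if_pos hC]
              · rw [if_neg hC, if_neg hC]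
                have hC' : (decide (dur ≤ rl + 1 + ((rest.length : Nat) : Int)) = false) ∨
                    ((rest.take (dur - rl - 1).toNat).all (fun p => p.2 == "-")) = false := by
                  by_cases hx : decide (dur ≤ rl + 1 + ((rest.length : Nat) : Int)) = true
                  · right
                    cases hy : (rest.take (dur - rl - 1).toNat).all (fun p => p.2 == "-")
                    · rfl
                    · exact absurd (by rw [hx, hy]; rfl) hC
                  · left
                    exact Bool.eq_false_iff.mpr hx
                rw [fasStruct]
                have hhead : (decide (dur ≤ ((((t,s)::rest).length : Nat) : Int)) &&
                    ((((t,s)::rest).take dur.toNat).all (fun p => p.2 == "-"))) = false := by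
                  rcases hC' with hlenF | htkF
                  · have : ¬ (dur ≤ ((((t,s)::rest).length : Nat) : Int)) := by
                      have := of_decide_eq_false hlenF
                      simp only [List.length_cons] at *
                      push_cast at *
                      omega
                    rw [decide_eq_false this, Bool.false_and]
                  · have hcons : ((((t,s)::rest).take dur.toNat).all (fun p => p.2 == "-")) = false := by
                      have h1' : dur.toNat = (dur.toNat - 1) + 1 := by omega
                      rw [h1', List.take_succ_cons]
                      simp only [List.all_cons, hs, Bool.true_and]
                      cases hy : (rest.take (dur.toNat - 1)).all (fun p => p.2 == "-")
                      · rfl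
                      · exfalso
                        have := take_all_mono (fun p => p.2 == "-") rest
                          (m := (dur - rl - 1).toNat) (m' := dur.toNat - 1) (by omega) hy
                        exact Bool.noConfusion (this.symm.trans htkF)
                    simp [hcons]
                rw [hhead]
                simp

lemma fasWin_eq (dur : Int) (hdur : 1 ≤ dur) (ds0 : List (String × String))
    (hnd : ((PySem.Dict.mk ds0).keys).Nodup) (k : Nat)
    (hk : (k : Int) + dur ≤ (ds0.length : Int)) :
    ((PySem.List.pyRange 0 dur).all (fun j =>
      ((PySem.List.pyGet? (ds0.map Prod.fst) ((k : Int) + j)).bind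
        (fun t => (PySem.Dict.mk ds0).get? t)) == some "-"))
    = (((ds0.drop k).take dur.toNat).all (fun p => p.2 == "-")) := by
  have hcomp : ∀ (i : Nat) (h : k + i < ds0.length),
      ((PySem.List.pyGet? (ds0.map Prod.fst) ((k : Int) + (i : Int))).bind
        (fun t => (PySem.Dict.mk ds0).get? t)) = some (ds0[k + i]'h).2 := by
    intro i h
    have hcast : (k : Int) + (i : Int) = ((k + i : Nat) : Int) := by push_cast; ring
    rw [hcast, PySem.List.pyGet?_natCast, List.getElem?_map, List.getElem?_eq_getElem h]
    simp only [Option.map_some, Option.bind_some]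
    apply PySem.Dict.get?_of_mem_items _ _ hnd
    show ((ds0[k + i]'h).1, (ds0[k + i]'h).2) ∈ ds0
    rw [Prod.mk.eta]
    exact List.getElem_mem h
  have hdm : dur = ((dur.toNat : Nat) : Int) := by omega
  rw [Bool.eq_iff_iff, List.all_eq_true, List.all_eq_true]
  constructor
  · intro h p hp
    rw [List.mem_iff_getElem] at hp
    obtain ⟨i, hi, hpi⟩ := hp
    have hi' : i < dur.toNat := by
      have := List.length_take_le dur.toNat (ds0.drop k)
      omega
    have hidx : k + i < ds0.length := by omega
    have hj : ((i : Nat) : Int) ∈ PySem.List.pyRange 0 dur := by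
      rw [hdm, PySem.List.pyRange_zero_natCast]
      exact List.mem_map.mpr ⟨i, List.mem_range.mpr hi', rfl⟩
    have hcond := h _ hj
    simp only at hcond
    rw [hcomp i hidx] at hcond
    have hpe : p = ds0[k + i]'hidx := by
      rw [← hpi, List.getElem_take, List.getElem_drop]
    rw [hpe]
    simpa using hcond
  · intro h j hj
    rw [hdm, PySem.List.pyRange_zero_natCast, List.mem_map] at hj
    obtain ⟨i, hi, rfl⟩ := hj
    rw [List.mem_range] at hi
    have hidx : k + i < ds0.length := by omega
    rw [hcomp i hidx]
    have hmem : ds0[k + i]'hidx ∈ (ds0.drop k).take dur.toNat := by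
      rw [List.mem_iff_getElem]
      refine ⟨i, ?_, ?_⟩
      · rw [List.length_take, List.length_drop]
        omega
      · rw [List.getElem_take, List.getElem_drop]
    simpa using h _ hmem

lemma fasALoop_main (dur : Int) (hdur : 1 ≤ dur) (ds0 : List (String × String))
    (hnd : ((PySem.Dict.mk ds0).keys).Nodup) :
    ∀ (m k : Nat), ds0.length - k ≤ m →
      fasALoop (PySem.Dict.mk ds0) (ds0.map Prod.fst) dur
        (((ds0.map Prod.fst).length : Int) - dur + 1) (k : Int)
        = fasStruct dur (ds0.drop k) := by
  intro m
  induction m with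
  | zero =>
      intro k hk
      rw [fasALoop]
      have hnb : ¬ ((k : Int) < (((ds0.map Prod.fst).length : Nat) : Int) - dur + 1) := by
        rw [List.length_map]
        omega
      rw [dif_neg hnb, List.drop_eq_nil_of_le (by omega)]
      rfl
  | succ m ihm =>
      intro k hk
      by_cases hkb : ((k : Int) < (((ds0.map Prod.fst).length : Nat) : Int) - dur + 1)
      · have hkb' : (k : Int) + dur ≤ (ds0.length : Int) := by
          rw [List.length_map] at hkb
          omega
        have hklen : k < ds0.length := by omega
        rw [fasALoop, dif_pos hkb, fasWin_eq dur hdur ds0 hnd k hkb']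
        have hdrop : ds0.drop k = ds0[k] :: ds0.drop (k + 1) := List.drop_eq_getElem_cons hklen
        by_cases hw : (((ds0.drop k).take dur.toNat).all (fun p => p.2 == "-")) = true
        · rw [if_pos hw, PySem.List.pyGet?_natCast, List.getElem?_map,
            List.getElem?_eq_getElem hklen]
          rw [hdrop, fasStruct]
          have hcond : (decide (dur ≤ (((ds0[k] :: ds0.drop (k + 1)).length : Nat) : Int)) &&
              ((ds0[k] :: ds0.drop (k + 1)).take dur.toNat).all (fun p => p.2 == "-")) = true := by
            rw [← hdrop, hw, Bool.and_true]
            rw [List.length_drop]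
            apply decide_eq_true
            omega
          rw [hcond, if_pos rfl]
          rfl
        · rw [if_neg hw]
          have hcast : (k : Int) + 1 = ((k + 1 : Nat) : Int) := by push_cast; ring
          rw [hcast, ihm (k + 1) (by omega)]
          rw [hdrop, fasStruct]
          have hwf : (((ds0.drop k).take dur.toNat).all (fun p => p.2 == "-")) = false :=
            Bool.eq_false_iff.mpr hw
          have hcond : (decide (dur ≤ (((ds0[k] :: ds0.drop (k + 1)).length : Nat) : Int)) &&
              ((ds0[k] :: ds0.drop (k + 1)).take dur.toNat).all (fun p => p.2 == "-")) = false := by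
            rw [← hdrop, hwf, Bool.and_false]
          rw [hcond]
          simp
      · rw [fasALoop, dif_neg hkb]
        rw [fasStruct_none_of_short dur _ ?_]
        rw [List.length_map] at hkb
        rw [List.length_drop]
        omega

-- ===== VERDICT (by name: the statement is the Claim_ definition above) =====
lemma get?_mk_eq_find? (schedule : List (String × List (String × String))) (day : String) :
    (PySem.Dict.mk schedule).get? day
      = (schedule.find? (fun p => p.1 == day)).map (fun p => p.2) := rfl

theorem find_available_slot_spec : Claim_equal_find_available_slot := by
  intro schedule day dur _ hpre
  unfold Spec_find_available_slot find_available_slot find_available_slot_alt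
  cases hfind : (PySem.Dict.mk schedule).get? day with
  | none => rfl
  | some ds0 =>
    dsimp only
    have hfd := hfind
    rw [get?_mk_eq_find?] at hfd
    unfold Pre_find_available_slot at hpre
    obtain ⟨p, hp, hp2⟩ := Option.map_eq_some_iff.mp hfd
    rw [hp, Option.all_some] at hpre
    rw [hp2] at hpre
    have hnd : (ds0.map Prod.fst).Nodup := by
      have := (Bool.and_eq_true _ _).mp hpre |>.1
      exact of_decide_eq_true this
    have hne : ds0 ≠ [] ∨ 1 ≤ dur := by
      have := (Bool.and_eq_true _ _).mp hpre |>.2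
      rcases (Bool.or_eq_true _ _).mp this with h | h
      · exact Or.inl (of_decide_eq_true h)
      · exact Or.inr (of_decide_eq_true h)
    have hnd' : ((PySem.Dict.mk ds0).keys).Nodup := hnd
    by_cases hdur : dur ≤ 0
    · -- duration_slots ≤ 0: A returns times[0], B returns keys.head?; ds0 ≠ [] by Pre_
      have hne' : ds0 ≠ [] := by
        rcases hne with h | h
        · exact h
        · omega
      rw [if_pos hdur]
      rw [fasALoop]
      have hlen0 : 0 < ds0.length := List.length_pos_iff.mpr hne'
      rw [dif_pos (by
        show (0 : Int) < (((PySem.Dict.mk ds0).keys.length : Nat) : Int) - dur + 1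
        have : (PySem.Dict.mk ds0).keys.length = ds0.length := by
          show (ds0.map (fun x => x.1)).length = ds0.length
          rw [List.length_map]
        rw [this]
        omega)]
      have hr0 : PySem.List.pyRange 0 dur = [] := by
        unfold PySem.List.pyRange
        rw [if_neg (by omega : ¬ (1 : Int) = 0)]
        simp only
        rw [if_pos (by omega : (0 : Int) < 1), if_neg (by omega : ¬ (0 : Int) < dur)]
        rfl
      rw [hr0]
      simp only [List.all_nil, if_true]
      show PySem.List.pyGet? ((PySem.Dict.mk ds0).keys) (((0 : Nat) : Int)) = _
      rw [PySem.List.pyGet?_natCast]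
      exact List.head?_eq_getElem?.symm
    · have hdur' : 1 ≤ dur := by omega
      rw [if_neg hdur]
      have hA := fasALoop_main dur hdur' ds0 hnd' ds0.length 0 (by omega)
      rw [List.drop_zero] at hA
      have hB := (fasBLoop_main dur hdur' ds0.length ds0 rfl).1
      show fasALoop (PySem.Dict.mk ds0) ((PySem.Dict.mk ds0).keys) dur _ ((0 : Nat) : Int)
        = fasBLoop dur ds0 none 0
      rw [hB]
      exact hA
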